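-- pv_equiv track=rewrite | github.com/pronea-hackathon-2026/hackathon | backend/services/interview.py | _calculate_attention_score
-- ===== SOURCE A (Python) =====
-- from typing import Any
--
-- def _calculate_attention_score(events: list[dict[str, Any]]) -> int:
--     """Calculate attention score from behavioural monitoring events.
--
--     Starts at 100 and applies the following deductions:
--         -20 per "phone_detected"
--         -10 per "tab_switch"
--         -10 per "window_blur"
--         -5  per "gaze_away_extended"
--
--     Args:
--         events: List of event dicts, each with at least a "type" key.
--
--     Returns:
--         Integer attention score, floored at 0.
--     """
--     _DEDUCTIONS: dict[str, int] = {
--         "phone_detected": 20,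
--         "tab_switch": 10,
--         "window_blur": 10,
--         "gaze_away_extended": 5,
--     }
--
--     score = 100
--     for event in events:
--         event_type = event.get("type", "")
--         deduction = _DEDUCTIONS.get(event_type, 0)
--         score -= deduction
--
--     return max(0, score)
-- ===== SOURCE B (Python) =====
-- def _calculate_attention_score(events):
--     """Sort-then-scan: sort the type list, then one run-length pass over the
--     sorted list adds weight * run_length per group of equal types."""
--     _W = {"phone_detected": 20, "tab_switch": 10,
--           "window_blur": 10, "gaze_away_extended": 5}
--     types = sorted(e.get("type", "") for e in events)
--     total = 0
--     i = 0
--     n = len(types)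
--     while i < n:
--         j = i + 1
--         while j < n and types[j] == types[i]:
--             j += 1
--         total += _W.get(types[i], 0) * (j - i)
--         i = j
--     return max(0, 100 - total)
-- ===== Notes on version B (the rewrite author's own statement) =====
-- stated objective: alternative
-- what changed: B sorts the extracted type list and does a run-length scan over the sorted list, adding weight*run_length once per group of equal types, instead of A's per-event dict-lookup subtraction loop.
import Mathlib
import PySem

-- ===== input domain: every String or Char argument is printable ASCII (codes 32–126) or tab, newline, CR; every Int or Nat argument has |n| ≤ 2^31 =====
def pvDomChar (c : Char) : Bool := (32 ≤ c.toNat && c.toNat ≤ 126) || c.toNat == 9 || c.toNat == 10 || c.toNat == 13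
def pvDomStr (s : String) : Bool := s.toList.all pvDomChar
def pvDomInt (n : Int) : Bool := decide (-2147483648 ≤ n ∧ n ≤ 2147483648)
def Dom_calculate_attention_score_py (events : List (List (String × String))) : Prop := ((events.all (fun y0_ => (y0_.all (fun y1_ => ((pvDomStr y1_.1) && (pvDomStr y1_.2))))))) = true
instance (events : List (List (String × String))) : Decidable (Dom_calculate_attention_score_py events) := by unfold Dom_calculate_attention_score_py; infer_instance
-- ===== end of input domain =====

-- B sorts the event-type list and does a run-length scan over the sorted list (weight * run length per group of equal types) instead of A's per-event dict-lookup subtraction loop; objective: alternative algorithm (sort-then-scan).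
-- ===== PORT A =====
-- _DEDUCTIONS literal dict
def pvDeductions : PySem.Dict String Int :=
  PySem.Dict.ofList [("phone_detected", 20), ("tab_switch", 10), ("window_blur", 10), ("gaze_away_extended", 5)]

def calculate_attention_score_py (events : List (List (String × String))) : Int :=
  let score : Int :=
    events.foldl (fun score event =>
      let event_type := (PySem.Dict.mk event).getD "type" ""
      let deduction := pvDeductions.getD event_type 0
      score - deduction) 100
  max 0 score

-- ===== PORT B =====
-- _W literal dict of Source B
def pvW : PySem.Dict String Int :=
  PySem.Dict.ofList [("phone_detected", 20), ("tab_switch", 10), ("window_blur", 10), ("gaze_away_extended", 5)]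

-- Source B's outer while loop: skip over the run starting at position i (the inner
-- while computing j is the run's length), add weight * run length, continue at j.
def pvRunScan : List String → Int
  | [] => 0
  | t :: rest =>
      pvW.getD t 0 * (1 + ((rest.takeWhile (fun s => s == t)).length : Int))
        + pvRunScan (rest.dropWhile (fun s => s == t))
termination_by l => l.length
decreasing_by
  simp only [List.length_cons]
  exact Nat.lt_succ_of_le (List.length_dropWhile_le _ _)

def calculate_attention_score_py_alt (events : List (List (String × String))) : Int :=
  let types := PySem.List.sorted (events.map (fun e => (PySem.Dict.mk e).getD "type" "")) (fun x => x) false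
  let total := pvRunScan types
  max 0 (100 - total)

-- ===== PRECONDITION & SPEC =====
def Spec_calculate_attention_score_py (events : List (List (String × String))) (out : Int) : Prop := out = calculate_attention_score_py_alt events
instance (events : List (List (String × String))) (out : Int) : Decidable (Spec_calculate_attention_score_py events out) := by unfold Spec_calculate_attention_score_py; infer_instance

-- ===== CLAIM (what is proved, stated in full; the proofs are below) =====
def Claim_equal_calculate_attention_score_py : Prop := ∀ (events : List (List (String × String))), Dom_calculate_attention_score_py events → Spec_calculate_attention_score_py events (calculate_attention_score_py events)

-- ===== LEMMAS AND PROOFS =====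

-- the run-length scan computes the per-element weight sum, on ANY list (each run consists of equal elements)
theorem pv_runScan_eq_sum (ts : List String) :
    pvRunScan ts = (ts.map (fun t => pvW.getD t 0)).sum := by
  induction ts using pvRunScan.induct with
  | case1 => simp [pvRunScan]
  | case2 t rest ih =>
      rw [pvRunScan, ih]
      have hsplit : rest = rest.takeWhile (fun s => s == t) ++ rest.dropWhile (fun s => s == t) :=
        (List.takeWhile_append_dropWhile).symm
      have hrep : (rest.takeWhile (fun s => s == t)).map (fun t => pvW.getD t 0)
          = List.replicate (rest.takeWhile (fun s => s == t)).length (pvW.getD t 0) := by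
        apply List.eq_replicate_iff.mpr
        refine ⟨by simp, ?_⟩
        intro b hb
        rcases List.mem_map.mp hb with ⟨x, hx, hxb⟩
        have : (x == t) = true := List.mem_takeWhile_imp (p := fun s => s == t) hx
        subst hxb
        rw [eq_of_beq this]
      calc pvW.getD t 0 * (1 + ((rest.takeWhile (fun s => s == t)).length : Int))
            + ((rest.dropWhile (fun s => s == t)).map (fun t => pvW.getD t 0)).sum
          = pvW.getD t 0
            + (((rest.takeWhile (fun s => s == t)).map (fun t => pvW.getD t 0)).sum
              + ((rest.dropWhile (fun s => s == t)).map (fun t => pvW.getD t 0)).sum) := by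
            rw [hrep, List.sum_replicate, nsmul_eq_mul]; ring
        _ = ((t :: rest).map (fun t => pvW.getD t 0)).sum := by
            conv_rhs => rw [List.map_cons, List.sum_cons, hsplit]
            rw [List.map_append, List.sum_append, hsplit]

-- A's subtraction loop computes 100 - the per-element weight sum
theorem pv_fold_eq (ts : List String) (acc : Int) :
    ts.foldl (fun s t => s - pvDeductions.getD t 0) acc
      = acc - (ts.map (fun t => pvDeductions.getD t 0)).sum := by
  induction ts generalizing acc with
  | nil => simp
  | cons x xs ih => rw [List.foldl_cons, ih, List.map_cons, List.sum_cons]; ring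

-- ===== VERDICT (by name: the statement is the Claim_ definition above) =====
theorem calculate_attention_score_py_spec : Claim_equal_calculate_attention_score_py := by
  intro events _
  unfold Spec_calculate_attention_score_py calculate_attention_score_py calculate_attention_score_py_alt
  dsimp only
  have hW : pvW = pvDeductions := rfl
  have h := pv_fold_eq (events.map (fun e => (PySem.Dict.mk e).getD "type" "")) 100
  rw [List.foldl_map] at h
  rw [h, pv_runScan_eq_sum, hW]
  have hperm : (PySem.List.sorted (events.map (fun e => (PySem.Dict.mk e).getD "type" "")) (fun x => x) false).Perm
      (events.map (fun e => (PySem.Dict.mk e).getD "type" "")) := PySem.List.sorted_perm _ _ _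
  rw [List.Perm.sum_eq (hperm.map (fun t => pvDeductions.getD t 0))]
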